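-- pv_equiv track=rewrite | github.com/danikdanon/TelegramBot | BuildingDictionaries.py | dictCurrPrev
-- ===== SOURCE A (Python) =====
-- def dictCurrPrev(words):
--     dict = {}
--
--     for i in range(1,len(words)):
--         curr = words[i]
--         prev = words[i - 1]
--
--         if curr in dict:
--             if prev in dict[curr]:
--                 dict[curr][prev] += 1
--             else:
--                 dict[curr][prev] = 1
--         else:
--             dict[curr] = {}
--             dict[curr][prev] = 1
--
--     return dict
-- ===== SOURCE B (Python) =====
-- def dictCurrPrev(words):
--     # Phase 1: flat count of consecutive (current, previous) pairs in one sweep.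
--     counts = {}
--     for pair in zip(words[1:], words[:-1]):
--         counts[pair] = counts.get(pair, 0) + 1
--     # Phase 2: pivot the flat table into the nested dict.
--     result = {}
--     for (curr, prev), c in counts.items():
--         result.setdefault(curr, {})[prev] = c
--     return result
-- ===== Notes on version B (the rewrite author's own statement) =====
-- stated objective: idiomatic
-- what changed: B replaces A's single inline branch-and-increment pass over indices by a two-phase tabulate-then-pivot: a flat (curr, prev) pair-count table built in one sweep over zip(words[1:], words[:-1]), then a second differently-shaped loop that pivots the flat table into the nested dict via setdefault.
import Mathlib
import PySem

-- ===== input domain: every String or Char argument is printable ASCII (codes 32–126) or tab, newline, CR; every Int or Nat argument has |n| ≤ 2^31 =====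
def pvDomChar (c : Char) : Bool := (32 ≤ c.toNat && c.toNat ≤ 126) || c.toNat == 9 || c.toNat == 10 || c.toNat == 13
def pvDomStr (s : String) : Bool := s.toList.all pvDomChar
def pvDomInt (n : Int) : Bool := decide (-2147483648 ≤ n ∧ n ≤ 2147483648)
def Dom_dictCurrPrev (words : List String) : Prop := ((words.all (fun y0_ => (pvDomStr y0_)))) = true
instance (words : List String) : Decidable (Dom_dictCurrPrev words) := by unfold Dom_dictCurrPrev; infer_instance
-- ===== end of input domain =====

-- B replaces A's single branch-and-increment pass by a two-phase tabulate-then-pivot: a flat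
-- (curr, prev) pair-count table built in one sweep, then pivoted into the nested dict (idiomatic).


-- ===== PORT A =====
-- for i in range(1, len(words)): branch on membership, increment or start the nested entries
def dictCurrPrev (words : List String) : List (String × List (String × Int)) :=
  let d :=
    (PySem.List.pyRange 1 (words.length : Int) 1).foldl
      (fun (d : PySem.Dict String (PySem.Dict String Int)) i =>
        let curr := PySem.List.pyGetD words i ""
        let prev := PySem.List.pyGetD words (i - 1) ""
        if d.contains curr then
          if (d.getD curr PySem.Dict.empty).contains prev then
            -- dict[curr][prev] += 1
            d.insert curr ((d.getD curr PySem.Dict.empty).modify prev 0 (· + 1))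
          else
            -- dict[curr][prev] = 1
            d.insert curr ((d.getD curr PySem.Dict.empty).insert prev 1)
        else
          -- dict[curr] = {}; dict[curr][prev] = 1
          d.insert curr (PySem.Dict.empty.insert prev 1))
      PySem.Dict.empty
  d.items.map (fun p => (p.1, p.2.items))

-- ===== PORT B =====
def dictCurrPrev_alt (words : List String) : List (String × List (String × Int)) :=
  -- Phase 1: counts[pair] = counts.get(pair, 0) + 1 over zip(words[1:], words[:-1])
  let pairs := List.zip (PySem.List.slice words (some 1) none) (PySem.List.slice words none (some (-1)))
  let counts := pairs.foldl
      (fun (c : PySem.Dict (String × String) Int) pr => c.insert pr (c.getD pr 0 + 1))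
      PySem.Dict.empty
  -- Phase 2: result.setdefault(curr, {})[prev] = c   (= result[curr] gets inner.insert prev c)
  let result := counts.items.foldl
      (fun (r : PySem.Dict String (PySem.Dict String Int)) e =>
        r.modify e.1.1 PySem.Dict.empty (fun inn => inn.insert e.1.2 e.2))
      PySem.Dict.empty
  result.items.map (fun p => (p.1, p.2.items))

-- ===== PRECONDITION & SPEC =====
def Spec_dictCurrPrev (words : List String) (out : List (String × List (String × Int))) : Prop := out = dictCurrPrev_alt words
instance (words : List String) (out : List (String × List (String × Int))) : Decidable (Spec_dictCurrPrev words out) := by unfold Spec_dictCurrPrev; infer_instance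

-- ===== CLAIM (what is proved, stated in full; the proofs are below) =====
def Claim_equal_dictCurrPrev : Prop := ∀ (words : List String), Dom_dictCurrPrev words → Spec_dictCurrPrev words (dictCurrPrev words)

-- ===== LEMMAS AND PROOFS =====

theorem pv_filter_ofList {α : Type} [BEq α] [LawfulBEq α] (p : α → Bool) (l : List α) :
    (PySem.Set.ofList l).filter p = PySem.Set.ofList (l.filter p) := by
  induction l using List.reverseRecOn with
  | nil => rfl
  | append_singleton xs x ih =>
    rw [PySem.Set.ofList_append_singleton, PySem.Set.add_eq_ite, List.filter_append]
    by_cases hx : x ∈ xs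
    · rw [if_pos (by simpa [PySem.Set.mem_ofList] using hx)]
      by_cases hp : p x
      · simp only [List.filter_cons, hp, if_pos, List.filter_nil]
        rw [PySem.Set.ofList_append_singleton, PySem.Set.add_of_mem
          (by rw [PySem.Set.mem_ofList]; exact List.mem_filter.mpr ⟨hx, hp⟩)]
        exact ih
      · simp only [List.filter_cons, hp]
        simpa using ih
    · rw [if_neg (by simpa [PySem.Set.mem_ofList] using hx)]
      by_cases hp : p x
      · simp only [List.filter_append, List.filter_cons, hp, if_pos, List.filter_nil]
        rw [ih, PySem.Set.ofList_append_singleton, PySem.Set.add_of_not_mem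
          (by rw [PySem.Set.mem_ofList]; intro hm; exact hx (List.mem_filter.mp hm).1)]
      · simp only [List.filter_cons, hp]
        rw [List.filter_append, ih]
        simp [hp]

theorem pv_map_ofList {α β : Type} [BEq α] [LawfulBEq α] [BEq β] [LawfulBEq β]
    (f : α → β) (l : List α) (hinj : ∀ a ∈ l, ∀ b ∈ l, f a = f b → a = b) :
    (PySem.Set.ofList l).map f = PySem.Set.ofList (l.map f) := by
  induction l using List.reverseRecOn with
  | nil => rfl
  | append_singleton xs x ih =>
    have hinj' : ∀ a ∈ xs, ∀ b ∈ xs, f a = f b → a = b := fun a ha b hb =>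
      hinj a (List.mem_append_left _ ha) b (List.mem_append_left _ hb)
    rw [PySem.Set.ofList_append_singleton, PySem.Set.add_eq_ite, List.map_append, List.map_singleton,
      PySem.Set.ofList_append_singleton, PySem.Set.add_eq_ite]
    by_cases hx : x ∈ PySem.Set.ofList xs
    · rw [if_pos hx, if_pos, ih hinj']
      rw [PySem.Set.mem_ofList]
      exact List.mem_map_of_mem (by simpa [PySem.Set.mem_ofList] using hx)
    · rw [if_neg hx, if_neg, List.map_append, List.map_singleton, ih hinj']
      rw [PySem.Set.mem_ofList]
      intro hm
      obtain ⟨a, ha, hfa⟩ := List.mem_map.mp hm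
      exact hx (by
        rw [PySem.Set.mem_ofList]
        have := hinj a (List.mem_append_left _ ha) x (List.mem_append_right _ (List.mem_singleton.mpr rfl)) hfa
        rwa [← this])

theorem pv_ofList_map_ofList {α β : Type} [BEq α] [LawfulBEq α] [BEq β] [LawfulBEq β]
    (f : α → β) (l : List α) :
    PySem.Set.ofList ((PySem.Set.ofList l).map f) = PySem.Set.ofList (l.map f) := by
  induction l using List.reverseRecOn with
  | nil => rfl
  | append_singleton xs x ih =>
    rw [PySem.Set.ofList_append_singleton, PySem.Set.add_eq_ite, List.map_append, List.map_singleton,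
      PySem.Set.ofList_append_singleton]
    by_cases hx : x ∈ PySem.Set.ofList xs
    · rw [if_pos hx, ih, PySem.Set.add_of_mem]
      rw [PySem.Set.mem_ofList]
      exact List.mem_map_of_mem (by simpa [PySem.Set.mem_ofList] using hx)
    · rw [if_neg hx, List.map_append, List.map_singleton, PySem.Set.ofList_append_singleton, ih]


def pvStep (d : PySem.Dict String (PySem.Dict String Int)) (q : String × String) :
    PySem.Dict String (PySem.Dict String Int) :=
  d.modify q.1 PySem.Dict.empty (fun inn => inn.modify q.2 0 (· + 1))

def pvPrevs (ps : List (String × String)) (c : String) : List String :=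
  (ps.filter (fun q => q.1 == c)).map Prod.snd

def pvSpecD (ps : List (String × String)) : PySem.Dict String (PySem.Dict String Int) :=
  PySem.Dict.mk ((PySem.Set.ofList (ps.map Prod.fst)).map
    (fun c => (c, PySem.Dict.counter (pvPrevs ps c))))

theorem pv_keys_specD (ps : List (String × String)) :
    (pvSpecD ps).keys = PySem.Set.ofList (ps.map Prod.fst) := by
  unfold pvSpecD
  rw [PySem.Dict.keys_mk, List.map_map]
  show List.map (fun c => c) _ = _
  exact List.map_id _

theorem pv_getD_specD (ps : List (String × String)) (c : String)
    (hc : c ∈ PySem.Set.ofList (ps.map Prod.fst)) :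
    (pvSpecD ps).getD c PySem.Dict.empty = PySem.Dict.counter (pvPrevs ps c) := by
  apply PySem.Dict.getD_of_mem_items
  · show _ ∈ (PySem.Set.ofList (ps.map Prod.fst)).map (fun c => (c, PySem.Dict.counter (pvPrevs ps c)))
    exact List.mem_map_of_mem hc
  · rw [pv_keys_specD]
    exact PySem.Set.nodup_ofList _

theorem pv_contains_specD (ps : List (String × String)) (c : String) :
    (pvSpecD ps).contains c = decide (c ∈ PySem.Set.ofList (ps.map Prod.fst)) := by
  rw [PySem.Dict.contains_eq_decide_mem_keys, pv_keys_specD]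

theorem pv_prevs_append_self (ps : List (String × String)) (c0 p0 : String) :
    pvPrevs (ps ++ [(c0, p0)]) c0 = pvPrevs ps c0 ++ [p0] := by
  unfold pvPrevs
  rw [List.filter_append, List.map_append]
  simp

theorem pv_prevs_append_ne (ps : List (String × String)) (c c0 p0 : String) (h : c ≠ c0) :
    pvPrevs (ps ++ [(c0, p0)]) c = pvPrevs ps c := by
  unfold pvPrevs
  rw [List.filter_append, List.map_append]
  have : (c0 == c) = false := by simpa using fun hh => h hh.symm
  simp [this]

theorem pv_N_char (ps : List (String × String)) :
    ps.foldl pvStep PySem.Dict.empty = pvSpecD ps := by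
  induction ps using List.reverseRecOn with
  | nil => rfl
  | append_singleton ps q ih =>
    obtain ⟨c0, p0⟩ := q
    rw [List.foldl_append, ih, List.foldl_cons, List.foldl_nil]
    show (pvSpecD ps).insert c0 (((pvSpecD ps).getD c0 PySem.Dict.empty).modify p0 0 (· + 1))
        = pvSpecD (ps ++ [(c0, p0)])
    by_cases hc : c0 ∈ PySem.Set.ofList (ps.map Prod.fst)
    · rw [pv_getD_specD ps c0 hc, PySem.Dict.counter_append_singleton (pvPrevs ps c0) p0 |>.symm,
        ← pv_prevs_append_self ps c0 p0]
      apply PySem.Dict.ext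
      rw [PySem.Dict.items_insert_of_contains _ _ (by rw [pv_contains_specD]; simpa using hc)]
      show List.map _ ((PySem.Set.ofList (ps.map Prod.fst)).map (fun c => (c, PySem.Dict.counter (pvPrevs ps c)))) = ((PySem.Set.ofList ((ps ++ [(c0,p0)]).map Prod.fst)).map (fun c => (c, PySem.Dict.counter (pvPrevs (ps ++ [(c0,p0)]) c))))
      rw [List.map_map, List.map_append, List.map_singleton, PySem.Set.ofList_append_singleton,
        PySem.Set.add_of_mem hc]
      apply List.map_congr_left
      intro c hcmem
      by_cases hcc : c = c0
      · subst hcc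
        simp only [Function.comp_apply, beq_self_eq_true, if_pos]
      · have hbe : (c == c0) = false := by simpa using hcc
        simp only [Function.comp_apply, hbe, Bool.false_eq_true, if_false]
        rw [pv_prevs_append_ne ps c c0 p0 hcc]
    · rw [PySem.Dict.getD_of_not_contains _ _ (by rw [pv_contains_specD]; simpa using hc)]
      apply PySem.Dict.ext
      rw [PySem.Dict.items_insert_of_not_contains _ _ (by rw [pv_contains_specD]; simpa using hc)]
      show (PySem.Set.ofList (ps.map Prod.fst)).map (fun c => (c, PySem.Dict.counter (pvPrevs ps c))) ++ _ = ((PySem.Set.ofList ((ps ++ [(c0,p0)]).map Prod.fst)).map (fun c => (c, PySem.Dict.counter (pvPrevs (ps ++ [(c0,p0)]) c))))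
      rw [List.map_append, List.map_singleton, PySem.Set.ofList_append_singleton,
        PySem.Set.add_of_not_mem hc, List.map_append, List.map_singleton]
      congr 1
      · apply List.map_congr_left
        intro c hcmem
        have hcc : c ≠ c0 := fun h => hc (h ▸ hcmem)
        rw [pv_prevs_append_ne ps c c0 p0 hcc]
      · rw [pv_prevs_append_self]
        have hfil : pvPrevs ps c0 = [] := by
          unfold pvPrevs
          rw [List.filter_eq_nil_iff.mpr, List.map_nil]
          intro q hq hq1
          exact hc (by
            rw [PySem.Set.mem_ofList]
            exact List.mem_map.mpr ⟨q, hq, by simpa using hq1⟩)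
        rw [hfil]
        rfl

def pvGrp (L : List ((String × String) × Int)) (c : String) : List (String × Int) :=
  (L.filter (fun e => e.1.1 == c)).map (fun e => (e.1.2, e.2))

def pvPivotD (L : List ((String × String) × Int)) : PySem.Dict String (PySem.Dict String Int) :=
  PySem.Dict.mk ((PySem.Set.ofList (L.map (fun e => e.1.1))).map
    (fun c => (c, PySem.Dict.mk (pvGrp L c))))

theorem pv_keys_pivotD (L : List ((String × String) × Int)) :
    (pvPivotD L).keys = PySem.Set.ofList (L.map (fun e => e.1.1)) := by
  unfold pvPivotD
  rw [PySem.Dict.keys_mk, List.map_map]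
  show List.map (fun c => c) _ = _
  exact List.map_id _

theorem pv_getD_pivotD (L : List ((String × String) × Int)) (c : String)
    (hc : c ∈ PySem.Set.ofList (L.map (fun e => e.1.1))) :
    (pvPivotD L).getD c PySem.Dict.empty = PySem.Dict.mk (pvGrp L c) := by
  apply PySem.Dict.getD_of_mem_items
  · show _ ∈ (PySem.Set.ofList (L.map (fun e => e.1.1))).map (fun c => (c, PySem.Dict.mk (pvGrp L c)))
    exact List.mem_map_of_mem hc
  · rw [pv_keys_pivotD]
    exact PySem.Set.nodup_ofList _

theorem pv_contains_pivotD (L : List ((String × String) × Int)) (c : String) :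
    (pvPivotD L).contains c = decide (c ∈ PySem.Set.ofList (L.map (fun e => e.1.1))) := by
  rw [PySem.Dict.contains_eq_decide_mem_keys, pv_keys_pivotD]

theorem pv_grp_append_self (L : List ((String × String) × Int)) (c0 p0 : String) (v : Int) :
    pvGrp (L ++ [((c0, p0), v)]) c0 = pvGrp L c0 ++ [(p0, v)] := by
  unfold pvGrp
  rw [List.filter_append, List.map_append]
  simp

theorem pv_grp_append_ne (L : List ((String × String) × Int)) (c c0 p0 : String) (v : Int)
    (h : c ≠ c0) :
    pvGrp (L ++ [((c0, p0), v)]) c = pvGrp L c := by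
  unfold pvGrp
  rw [List.filter_append, List.map_append]
  have : (c0 == c) = false := by simpa using fun hh => h hh.symm
  simp [this]

theorem pv_pivot_char (L : List ((String × String) × Int)) (h : (L.map Prod.fst).Nodup) :
    L.foldl
      (fun (r : PySem.Dict String (PySem.Dict String Int)) e =>
        r.modify e.1.1 PySem.Dict.empty (fun inn => inn.insert e.1.2 e.2))
      PySem.Dict.empty
    = pvPivotD L := by
  induction L using List.reverseRecOn with
  | nil => rfl
  | append_singleton L e ih =>
    obtain ⟨⟨c0, p0⟩, v⟩ := e
    rw [List.map_append, List.map_singleton] at h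
    have hnd : (L.map Prod.fst).Nodup := (List.nodup_append.mp h).1
    have hq : ((c0, p0) : String × String) ∉ L.map Prod.fst := by
      have := (List.nodup_append.mp h).2.2
      intro hm
      exact this _ hm _ (by simp) rfl
    rw [List.foldl_append, ih hnd, List.foldl_cons, List.foldl_nil]
    show (pvPivotD L).insert c0 (((pvPivotD L).getD c0 PySem.Dict.empty).insert p0 v)
        = pvPivotD (L ++ [((c0, p0), v)])
    by_cases hc : c0 ∈ PySem.Set.ofList (L.map (fun e => e.1.1))
    · rw [pv_getD_pivotD L c0 hc]
      have hp0 : ((PySem.Dict.mk (pvGrp L c0)).insert p0 v).items = pvGrp L c0 ++ [(p0, v)] := by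
        apply PySem.Dict.items_insert_of_not_contains
        show ((PySem.Dict.mk (pvGrp L c0)).contains p0) = false
        rw [PySem.Dict.contains_eq_decide_mem_keys, PySem.Dict.keys_mk]
        rw [decide_eq_false_iff_not]
        intro hm
        unfold pvGrp at hm
        rw [List.map_map] at hm
        obtain ⟨e, he, hee⟩ := List.mem_map.mp hm
        have he1 := (List.mem_filter.mp he).2
        apply hq
        apply List.mem_map.mpr
        refine ⟨e, (List.mem_filter.mp he).1, ?_⟩
        have : e.1.1 = c0 := by simpa using he1
        have h2 : e.1.2 = p0 := by simpa using hee
        calc e.1 = (e.1.1, e.1.2) := rfl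
          _ = (c0, p0) := by rw [this, h2]
      have hinner : (PySem.Dict.mk (pvGrp L c0)).insert p0 v
          = PySem.Dict.mk (pvGrp (L ++ [((c0, p0), v)]) c0) := by
        apply PySem.Dict.ext
        rw [hp0, pv_grp_append_self]
      rw [hinner]
      apply PySem.Dict.ext
      rw [PySem.Dict.items_insert_of_contains _ _ (by rw [pv_contains_pivotD]; simpa using hc)]
      show List.map _ ((PySem.Set.ofList (L.map (fun e => e.1.1))).map (fun c => (c, PySem.Dict.mk (pvGrp L c)))) = ((PySem.Set.ofList ((L ++ [((c0,p0),v)]).map (fun e => e.1.1))).map (fun c => (c, PySem.Dict.mk (pvGrp (L ++ [((c0,p0),v)]) c))))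
      rw [List.map_map, List.map_append, List.map_singleton, PySem.Set.ofList_append_singleton,
        PySem.Set.add_of_mem hc]
      apply List.map_congr_left
      intro c hcmem
      by_cases hcc : c = c0
      · subst hcc
        simp only [Function.comp_apply, beq_self_eq_true, if_pos]
      · have hbe : (c == c0) = false := by simpa using hcc
        simp only [Function.comp_apply, hbe, Bool.false_eq_true, if_false]
        rw [pv_grp_append_ne L c c0 p0 v hcc]
    · rw [PySem.Dict.getD_of_not_contains _ _ (by rw [pv_contains_pivotD]; simpa using hc)]
      apply PySem.Dict.ext
      rw [PySem.Dict.items_insert_of_not_contains _ _ (by rw [pv_contains_pivotD]; simpa using hc)]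
      show (PySem.Set.ofList (L.map (fun e => e.1.1))).map (fun c => (c, PySem.Dict.mk (pvGrp L c))) ++ _ = ((PySem.Set.ofList ((L ++ [((c0,p0),v)]).map (fun e => e.1.1))).map (fun c => (c, PySem.Dict.mk (pvGrp (L ++ [((c0,p0),v)]) c))))
      rw [List.map_append, List.map_singleton, PySem.Set.ofList_append_singleton,
        PySem.Set.add_of_not_mem hc, List.map_append, List.map_singleton]
      congr 1
      · apply List.map_congr_left
        intro c hcmem
        have hcc : c ≠ c0 := fun hh => hc (hh ▸ hcmem)
        rw [pv_grp_append_ne L c c0 p0 v hcc]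
      · rw [pv_grp_append_self]
        have hfil : pvGrp L c0 = [] := by
          unfold pvGrp
          rw [List.filter_eq_nil_iff.mpr, List.map_nil]
          intro e he he1
          exact hc (by
            rw [PySem.Set.mem_ofList]
            exact List.mem_map.mpr ⟨e, he, by simpa using he1⟩)
        rw [hfil]
        rfl

theorem pv_count_snd (ps : List (String × String)) (c : String) (q : String × String)
    (hq1 : q.1 = c) :
    List.count q.2 ((ps.filter (fun e => e.1 == c)).map Prod.snd) = List.count q ps := by
  rw [List.count_eq_countP, List.count_eq_countP, List.countP_map, List.countP_filter]
  apply List.countP_congr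
  intro e _
  rcases e with ⟨e1, e2⟩
  rcases q with ⟨q1, q2⟩
  simp only at hq1
  subst hq1
  by_cases h1 : e1 = q1 <;> by_cases h2 : e2 = q2 <;>
    simp [h1, h2, Function.comp, Prod.ext_iff]

theorem pv_snd_inj (ps : List (String × String)) (c : String) :
    ∀ a ∈ ps.filter (fun q => q.1 == c), ∀ b ∈ ps.filter (fun q => q.1 == c),
      Prod.snd a = Prod.snd b → a = b := by
  intro a ha b hb hab
  have ha1 : a.1 = c := by simpa using (List.mem_filter.mp ha).2
  have hb1 : b.1 = c := by simpa using (List.mem_filter.mp hb).2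
  calc a = (a.1, a.2) := rfl
    _ = (b.1, b.2) := by rw [ha1, hb1, hab]
    _ = b := rfl

theorem pv_B_eq_spec (ps : List (String × String)) :
    pvPivotD ((PySem.Set.ofList ps).map (fun k => (k, (List.count k ps : Int)))) = pvSpecD ps := by
  unfold pvPivotD pvSpecD
  have houter : ((PySem.Set.ofList ps).map (fun k => (k, (List.count k ps : Int)))).map (fun e => e.1.1)
      = (PySem.Set.ofList ps).map Prod.fst := by
    rw [List.map_map]; rfl
  rw [houter, pv_ofList_map_ofList]
  apply PySem.Dict.ext
  show List.map _ _ = List.map _ _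
  apply List.map_congr_left
  intro c hcmem
  refine congrArg (fun d => (c, d)) ?_
  apply PySem.Dict.ext
  rw [PySem.Dict.items_counter]
  show pvGrp ((PySem.Set.ofList ps).map (fun k => (k, (List.count k ps : Int)))) c = _
  unfold pvGrp pvPrevs
  rw [List.filter_map]
  have hfpred : ((fun (e : (String × String) × Int) => e.1.1 == c) ∘ (fun k => (k, (List.count k ps : Int))))
      = fun (q : String × String) => q.1 == c := rfl
  rw [hfpred, List.map_map, pv_filter_ofList,
    ← pv_map_ofList Prod.snd (ps.filter (fun q => q.1 == c)) (pv_snd_inj ps c), List.map_map]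
  apply List.map_congr_left
  intro q hq
  have hq1 : q.1 = c := by
    have := (List.mem_filter.mp ((PySem.Set.mem_ofList _ _).mp hq)).2
    simpa using this
  show (q.2, (List.count q ps : Int)) = (q.2, (List.count q.2 _ : Int))
  rw [pv_count_snd ps c q hq1]


theorem pv_zip_eq (words : List String) :
    List.zip (PySem.List.slice words (some 1) none) (PySem.List.slice words none (some (-1)))
    = List.zip (words.drop 1) words := by
  have h0 : PySem.List.slice words (some 1) none = words.drop 1 := by
    have := PySem.List.slice_from (xs := words) (a := 1) (by norm_num)
    simpa [List.drop_one] using this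
  have h1 : PySem.List.slice words none (some (-1)) = words.take (words.length - 1) := by
    simp [PySem.List.slice, PySem.List.clampIdx]
    split_ifs with h
    · simp [h]
    · have : words.length ≠ 0 := fun hn => h (List.length_eq_zero_iff.mp hn)
      omega
  rw [h0, h1]
  apply List.ext_getElem
  · simp
  · intro i hh1 hh2
    simp [List.getElem_zip]

theorem pv_stepA_eq (d : PySem.Dict String (PySem.Dict String Int)) (curr prev : String) :
    (if d.contains curr then
       if (d.getD curr PySem.Dict.empty).contains prev then
         d.insert curr ((d.getD curr PySem.Dict.empty).modify prev 0 (· + 1))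
       else
         d.insert curr ((d.getD curr PySem.Dict.empty).insert prev 1)
     else
       d.insert curr (PySem.Dict.empty.insert prev 1))
    = pvStep d (curr, prev) := by
  unfold pvStep
  have hmod : ∀ (inn : PySem.Dict String Int),
      inn.modify prev 0 (· + 1) = inn.insert prev (inn.getD prev 0 + 1) := fun _ => rfl
  have houter : d.modify curr PySem.Dict.empty (fun inn => inn.modify prev 0 (· + 1))
      = d.insert curr ((d.getD curr PySem.Dict.empty).modify prev 0 (· + 1)) := rfl
  rw [houter]
  split_ifs with h1 h2
  · rfl
  · rw [hmod, PySem.Dict.getD_of_not_contains _ 0 (by simpa using h2)]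
    norm_num
  · rw [PySem.Dict.getD_of_not_contains _ PySem.Dict.empty (by simpa using h1), hmod,
      PySem.Dict.getD_empty]
    norm_num

theorem pv_range_map (words : List String) :
    (PySem.List.pyRange 1 (words.length : Int) 1).map
      (fun i => (PySem.List.pyGetD words i "", PySem.List.pyGetD words (i - 1) ""))
      = List.zip (words.drop 1) words := by
  apply List.ext_getElem
  · simp [PySem.List.length_pyRange_one]
  · intro k hk1 hk2
    have hk : k < (PySem.List.pyRange 1 (words.length : Int) 1).length := by
      simpa using hk1
    have hlen : (1 : Int) + k < words.length := by
      rw [List.length_map, PySem.List.length_pyRange_one] at hk1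
      omega
    rw [List.getElem_map, PySem.List.getElem_pyRange_one]
    rw [List.getElem_zip]
    rw [PySem.List.pyGetD_eq_getElem words "" (by omega) hlen,
        PySem.List.pyGetD_eq_getElem words "" (by omega) (by omega)]
    have h1' : (1 + (k:Int)).toNat = 1 + k := by omega
    have h2' : (1 + (k:Int) - 1).toNat = k := by omega
    rw [List.getElem_drop]
    simp [h1']

theorem pv_A_fold_eq (words : List String) :
    (PySem.List.pyRange 1 (words.length : Int) 1).foldl
      (fun (d : PySem.Dict String (PySem.Dict String Int)) i =>
        let curr := PySem.List.pyGetD words i ""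
        let prev := PySem.List.pyGetD words (i - 1) ""
        if d.contains curr then
          if (d.getD curr PySem.Dict.empty).contains prev then
            d.insert curr ((d.getD curr PySem.Dict.empty).modify prev 0 (· + 1))
          else
            d.insert curr ((d.getD curr PySem.Dict.empty).insert prev 1)
        else
          d.insert curr (PySem.Dict.empty.insert prev 1))
      PySem.Dict.empty
    = (List.zip (words.drop 1) words).foldl pvStep PySem.Dict.empty := by
  have hbody : (fun (d : PySem.Dict String (PySem.Dict String Int)) (i : Int) =>
      let curr := PySem.List.pyGetD words i ""
      let prev := PySem.List.pyGetD words (i - 1) ""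
      if d.contains curr then
        if (d.getD curr PySem.Dict.empty).contains prev then
          d.insert curr ((d.getD curr PySem.Dict.empty).modify prev 0 (· + 1))
        else
          d.insert curr ((d.getD curr PySem.Dict.empty).insert prev 1)
      else
        d.insert curr (PySem.Dict.empty.insert prev 1))
      = fun d i => pvStep d (PySem.List.pyGetD words i "", PySem.List.pyGetD words (i - 1) "") := by
    funext d i
    exact pv_stepA_eq d _ _
  rw [hbody, ← pv_range_map words, List.foldl_map]

-- ===== VERDICT (by name: the statement is the Claim_ definition above) =====
theorem dictCurrPrev_spec : Claim_equal_dictCurrPrev := by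
  intro words _
  unfold Spec_dictCurrPrev
  simp only [dictCurrPrev, dictCurrPrev_alt]
  rw [pv_A_fold_eq, pv_zip_eq, pv_N_char,
    PySem.Dict.foldl_insert_getD_add_one_eq_counter, PySem.Dict.items_counter]
  have hnd : ((((PySem.Set.ofList ((words.drop 1).zip words)).map
      (fun k => (k, (List.count k ((words.drop 1).zip words) : Int)))).map Prod.fst)).Nodup := by
    rw [List.map_map]
    show (List.map (fun k => k) _).Nodup
    rw [show (fun (k : String × String) => k) = id from rfl, List.map_id]
    exact PySem.Set.nodup_ofList _
  rw [pv_pivot_char _ hnd, pv_B_eq_spec]
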